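-- pv_equiv track=rewrite | github.com/mmaysami/Leetfun | algorithms/alg763_partition_labels.py | partitionLabels_alt
-- ===== SOURCE A (Python) =====
-- def partitionLabels_alt(s: str):  # -> list[int]
--     hash_dict = {}
--     for i in range(len(s)):
--         # Hash of letter: [min index, max index]
--         if s[i] in hash_dict:
--             hash_dict[s[i]][1] = i
--         else:
--             hash_dict[s[i]] = [i, i]
--
--     # Sort Index intervals for each letter by start
--     intervals = list(hash_dict.values())
--     intervals.sort(key=lambda x: x[0])
--     res = [intervals[0]]
--
--     # Merge Overlapping Intervals
--     for i in range(1, len(intervals)):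
--         if intervals[i][0] < res[-1][1]:
--             res[-1][1] = max(res[-1][1], intervals[i][1])
--         else:
--             res.append(intervals[i])
--
--     return [e[1] - e[0] + 1 for e in res]
-- ===== SOURCE B (Python) =====
-- def partitionLabels_alt(s: str):  # -> list[int]
--     last = {}
--     for i, c in enumerate(s):
--         last[c] = i
--     res = []
--     anchor = 0
--     end = 0
--     for i, c in enumerate(s):
--         end = max(end, last[c])
--         if i == end:
--             res.append(i - anchor + 1)
--             anchor = i + 1
--     return res
-- ===== Notes on version B (the rewrite author's own statement) =====
-- stated objective: simpler
-- what changed: replaces the per-character [first,last]-interval dictionary, the sort of the intervals by start and the interval-merging pass with the classic single scan that records each character's last occurrence and closes a partition exactly when the index reaches the running maximum of the last occurrences seen so far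
import Mathlib
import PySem

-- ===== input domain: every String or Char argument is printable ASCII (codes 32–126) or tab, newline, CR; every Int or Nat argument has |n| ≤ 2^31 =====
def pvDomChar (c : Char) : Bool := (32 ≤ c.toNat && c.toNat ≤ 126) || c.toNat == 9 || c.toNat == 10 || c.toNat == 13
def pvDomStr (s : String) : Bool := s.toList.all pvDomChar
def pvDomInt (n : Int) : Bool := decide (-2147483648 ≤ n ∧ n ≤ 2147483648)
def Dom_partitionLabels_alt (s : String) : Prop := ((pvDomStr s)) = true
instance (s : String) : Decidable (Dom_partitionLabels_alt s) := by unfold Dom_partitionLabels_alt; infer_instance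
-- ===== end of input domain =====

-- B replaces A's per-character interval dictionary + sort + interval merge by the classic
-- single last-occurrence scan (same values; a simpler, genuinely different algorithm).


-- ===== PORT A =====
-- hash_dict: {letter: [min index, max index]} — the 2-element Python list is ported as a pair
def pvAHash (l : List Char) : PySem.Dict Char (Int × Int) :=
  (PySem.List.pyRange 0 (PySem.List.len l) 1).foldl
    (fun (d : PySem.Dict Char (Int × Int)) i =>
      let c := PySem.List.pyGetD l i ' '   -- s[i]; i is always in range here
      if d.contains c then
        d.modify c (0, 0) (fun p => (p.1, i))   -- hash_dict[s[i]][1] = i (key present)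
      else d.insert c (i, i))
    PySem.Dict.empty

-- the merge loop (res starts as [intervals[0]]: IndexError on empty s is excluded by Pre_)
def pvAMerge (intervals : List (Int × Int)) : List (Int × Int) :=
  (PySem.List.pyRange 1 (PySem.List.len intervals) 1).foldl
    (fun (res : List (Int × Int)) i =>
      let iv := PySem.List.pyGetD intervals i (0, 0)
      if iv.1 < (PySem.List.pyGetD res (-1) (0, 0)).2 then
        PySem.List.pySetD res (-1)
          ((PySem.List.pyGetD res (-1) (0, 0)).1,
            max (PySem.List.pyGetD res (-1) (0, 0)).2 iv.2)   -- res[-1][1] = max(res[-1][1], iv[1])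
      else res ++ [iv])
    [PySem.List.pyGetD intervals 0 (0, 0)]

def partitionLabels_alt (s : String) : List Int :=
  (pvAMerge (PySem.List.sorted (pvAHash s.toList).values (fun x => x.1))).map
    (fun e => e.2 - e.1 + 1)

-- ===== PORT B =====
-- last occurrence of each character
def pvBLast (l : List Char) : PySem.Dict Char Int :=
  (PySem.List.enumerate l).foldl (fun (d : PySem.Dict Char Int) p => d.insert p.2 p.1)
    PySem.Dict.empty

def partitionLabels_alt_alt (s : String) : List Int :=
  let l := s.toList
  let last := pvBLast l
  ((PySem.List.enumerate l).foldl
    (fun (st : List Int × Int × Int) p =>          -- st = (res, anchor, end)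
      let e := max st.2.2 (last.getD p.2 0)        -- last[c]: key always present, so getD is exact
      if p.1 = e then (st.1 ++ [p.1 - st.2.1 + 1], p.1 + 1, e)
      else (st.1, st.2.1, e))
    ([], 0, 0)).1

-- ===== PRECONDITION & SPEC =====
-- Pre_ excludes only the empty string, on which A raises IndexError (intervals[0]); B returns [] there.
def Pre_partitionLabels_alt (s : String) : Prop := s.toList ≠ []
instance (s : String) : Decidable (Pre_partitionLabels_alt s) := by
  unfold Pre_partitionLabels_alt; infer_instance
def pvWitness_partitionLabels_alt : String := "ab"

def Spec_partitionLabels_alt (s : String) (out : List Int) : Prop := out = partitionLabels_alt_alt s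
instance (s : String) (out : List Int) : Decidable (Spec_partitionLabels_alt s out) := by
  unfold Spec_partitionLabels_alt; infer_instance

-- ===== CLAIM (what is proved, stated in full; the proofs are below) =====
def Claim_equal_partitionLabels_alt : Prop := ∀ (s : String), Dom_partitionLabels_alt s → Pre_partitionLabels_alt s → Spec_partitionLabels_alt s (partitionLabels_alt s)

-- ===== LEMMAS AND PROOFS =====

-- abstract model: first / last occurrence, running maximum, per-character intervals
def fstI (l : List Char) (c : Char) : Int := (l.idxOf c : Int)
def lstI (l : List Char) (c : Char) : Int :=
  (l.length : Int) - 1 - (l.reverse.idxOf c : Int)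
def gD (l : List Char) (i : Nat) : Char := l.getD i ' '

lemma idxOf_le_of_getElem {l : List Char} {j : Nat} {c : Char} (h : j < l.length)
    (hc : l[j] = c) : l.idxOf c ≤ j := by
  by_contra hlt
  have hlt' : j < List.idxOf c l := Nat.lt_of_not_le hlt
  have := List.not_of_lt_findIdx (p := fun x => x == c) (xs := l) (i := j) hlt'
  simp at this
  exact this hc

lemma lstI_append_self (u : List Char) (a : Char) :
    lstI (u ++ [a]) a = (u.length : Int) := by
  simp [lstI, List.reverse_append]

lemma lstI_append_ne (u : List Char) (a c : Char) (h : c ≠ a) :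
    lstI (u ++ [a]) c = lstI u c := by
  simp [lstI, List.reverse_append, List.idxOf_cons_ne _ (Ne.symm h)]
  ring

lemma fstI_append_mem {u : List Char} {c : Char} (a : Char) (h : c ∈ u) :
    fstI (u ++ [a]) c = fstI u c := by
  simp [fstI, List.idxOf_append, h]

lemma fstI_append_self {u : List Char} {a : Char} (h : a ∉ u) :
    fstI (u ++ [a]) a = (u.length : Int) := by
  simp [fstI, List.idxOf_append, h]

lemma fstI_lt_len {l : List Char} {c : Char} (h : c ∈ l) : fstI l c < (l.length : Int) := by
  simp [fstI]
  exact_mod_cast List.idxOf_lt_length_of_mem h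

lemma lstI_lt_len (l : List Char) (c : Char) : lstI l c < (l.length : Int) := by
  simp [lstI]
  omega

lemma gD_fstI {l : List Char} {c : Char} (h : c ∈ l) : gD l (fstI l c).toNat = c := by
  have hlt := List.idxOf_lt_length_of_mem h
  have ht : (fstI l c).toNat = l.idxOf c := by simp [fstI]
  rw [gD, ht, List.getD_eq_getElem _ _ hlt]
  exact List.getElem_idxOf hlt

lemma gD_lstI {l : List Char} {c : Char} (h : c ∈ l) : gD l (lstI l c).toNat = c := by
  have hm : c ∈ l.reverse := by simpa using h
  have hlt := List.idxOf_lt_length_of_mem hm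
  simp at hlt
  have hl : 0 < l.length := List.length_pos_of_mem h
  have h0 : (lstI l c).toNat = l.length - 1 - l.reverse.idxOf c := by
    simp only [lstI]; omega
  have h2 : l.length - 1 - l.reverse.idxOf c < l.length := by omega
  rw [gD, h0, List.getD_eq_getElem _ _ h2]
  have h3 : l.reverse.idxOf c < l.reverse.length := by simpa using hlt
  have h4 := List.getElem_idxOf (x := c) (xs := l.reverse) h3
  rw [List.getElem_reverse] at h4
  exact h4

lemma fstI_gD_le {l : List Char} {j : Nat} (h : j < l.length) : fstI l (gD l j) ≤ (j : Int) := by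
  have : l.idxOf (gD l j) ≤ j :=
    idxOf_le_of_getElem h (by rw [gD, List.getD_eq_getElem _ _ h])
  simp only [fstI]
  exact_mod_cast this

lemma le_lstI_gD {l : List Char} {j : Nat} (h : j < l.length) : (j : Int) ≤ lstI l (gD l j) := by
  have hj : l.length - 1 - j < l.reverse.length := by simp; omega
  have : l.reverse.idxOf (gD l j) ≤ l.length - 1 - j := by
    apply idxOf_le_of_getElem hj
    rw [List.getElem_reverse]
    have he : l.length - 1 - (l.length - 1 - j) = j := by omega
    simp only [he]
    rw [gD, List.getD_eq_getElem _ _ h]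
  simp only [lstI]
  omega

lemma gD_mem {l : List Char} {j : Nat} (h : j < l.length) : gD l j ∈ l := by
  rw [gD, List.getD_eq_getElem _ _ h]
  exact List.getElem_mem h

def Mx (l : List Char) : Nat → Int
  | 0 => 0
  | (i+1) => max (Mx l i) (lstI l (gD l i))

lemma Mx_le {l : List Char} {j i : Nat} (hj : j < i) (hi : i ≤ l.length) :
    lstI l (gD l j) ≤ Mx l i := by
  induction i with
  | zero => omega
  | succ k ih =>
    rcases Nat.lt_succ_iff_lt_or_eq.mp hj with h | h
    · exact le_trans (ih h (by omega)) (le_max_left _ _)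
    · subst h; exact le_max_right _ _

lemma Mx_attained {l : List Char} {i : Nat} (h1 : 1 ≤ i) (hi : i ≤ l.length) :
    ∃ j < i, Mx l i = lstI l (gD l j) := by
  induction i with
  | zero => omega
  | succ k ih =>
    rcases Nat.eq_zero_or_pos k with hk | hk
    · subst hk
      refine ⟨0, by omega, ?_⟩
      have := le_lstI_gD (l := l) (j := 0) (by omega)
      simp [Mx]
      omega
    · obtain ⟨j, hj, he⟩ := ih hk (by omega)
      rcases max_cases (Mx l k) (lstI l (gD l k)) with ⟨h2, _⟩ | ⟨h2, _⟩
      · exact ⟨j, by omega, by rw [show Mx l (k+1) = max (Mx l k) (lstI l (gD l k)) from rfl, h2, he]⟩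
      · exact ⟨k, by omega, by rw [show Mx l (k+1) = max (Mx l k) (lstI l (gD l k)) from rfl, h2]⟩

lemma Mx_ge {l : List Char} {i : Nat} (h1 : 1 ≤ i) (hi : i ≤ l.length) :
    (i : Int) - 1 ≤ Mx l i := by
  obtain ⟨k, rfl⟩ : ∃ k, i = k + 1 := ⟨i - 1, by omega⟩
  have := le_lstI_gD (l := l) (j := k) (by omega)
  have h2 := le_max_right (Mx l k) (lstI l (gD l k))
  simp only [Mx]
  push_cast
  omega

lemma Mx_lt_len {l : List Char} {i : Nat} (h1 : 1 ≤ i) (hi : i ≤ l.length) :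
    Mx l i ≤ (l.length : Int) - 1 := by
  obtain ⟨j, hj, he⟩ := Mx_attained h1 hi
  have := lstI_lt_len l (gD l j)
  omega

lemma fstI_nonneg (l : List Char) (c : Char) : 0 ≤ fstI l c := by
  simp [fstI]

lemma Mx_seen {l : List Char} {q i : Nat} (hq : q < l.length) (_hi : i ≤ l.length)
    (h : fstI l (gD l q) < (i : Int)) : lstI l (gD l q) ≤ Mx l i := by
  have hmem := gD_mem hq
  have h0 : 0 ≤ fstI l (gD l q) := fstI_nonneg l (gD l q)
  have hti : (fstI l (gD l q)).toNat < i := by omega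
  have hgd : gD l (fstI l (gD l q)).toNat = gD l q := gD_fstI hmem
  have h2 := Mx_le hti _hi
  rw [hgd] at h2
  exact h2

lemma blast_general (l : List Char) (D : PySem.Dict Char Int) (c : Char) (d : Int) :
    ((PySem.List.enumerate l 0).foldl (fun d p => d.insert p.2 p.1) D).getD c d
      = if c ∈ l then lstI l c else D.getD c d := by
  induction l using List.reverseRecOn generalizing D with
  | nil => simp [PySem.List.enumerate]
  | append_singleton u a ih =>
    rw [PySem.List.enumerate_append, List.foldl_append]
    simp only [PySem.List.enumerate, List.foldl]
    rw [PySem.Dict.getD_insert]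
    by_cases hca : c = a
    · subst hca
      simp [lstI_append_self]
    · rw [if_neg hca, ih]
      by_cases hcu : c ∈ u
      · simp [hcu, hca, lstI_append_ne u a c hca]
      · simp [hcu, hca]

lemma pvBLast_getD (l : List Char) (c : Char) (d : Int) :
    (pvBLast l).getD c d = if c ∈ l then lstI l c else d := by
  rw [pvBLast, blast_general]
  simp [PySem.Dict.getD_empty]

lemma dedup_append (u : List Char) (a : Char) :
    PySem.List.dedup (u ++ [a]) =
      if a ∈ u then PySem.List.dedup u else PySem.List.dedup u ++ [a] := by
  rw [PySem.List.dedup, PySem.List.dedup, PySem.Set.ofList, PySem.Set.ofList, List.foldl_append]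
  simp only [List.foldl]
  rw [PySem.Set.add]
  have hc : (List.foldl PySem.Set.add PySem.Set.empty u).contains a = decide (a ∈ u) := by
    have h1 := PySem.Set.mem_ofList u a
    rw [PySem.Set.ofList] at h1
    rw [show (List.foldl PySem.Set.add PySem.Set.empty u).contains a = decide (a ∈ List.foldl PySem.Set.add PySem.Set.empty u) from by simp]
    have h1' : a ∈ List.foldl PySem.Set.add ([] : List Char) u ↔ a ∈ u := h1
    simp [h1']
  rw [hc]
  by_cases hau : a ∈ u <;> simp [hau]

lemma mem_of_mem_dedup {u : List Char} {c : Char} (h : c ∈ PySem.List.dedup u) : c ∈ u :=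
  (PySem.List.mem_dedup u c).mp h

lemma pvAHash_enum (l : List Char) :
    pvAHash l = (PySem.List.enumerate l 0).foldl
      (fun (d : PySem.Dict Char (Int × Int)) p =>
        if d.contains p.2 then d.modify p.2 (0, 0) (fun q => (q.1, p.1))
        else d.insert p.2 (p.1, p.1))
      PySem.Dict.empty := by
  rw [pvAHash, PySem.List.enumerate_eq_map_pyRange l ' ', List.foldl_map]

lemma pvAHash_items (l : List Char) :
    (pvAHash l).items = (PySem.List.dedup l).map (fun c => (c, fstI l c, lstI l c)) := by
  rw [pvAHash_enum]
  induction l using List.reverseRecOn with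
  | nil => rfl
  | append_singleton u a ih =>
    rw [PySem.List.enumerate_append, List.foldl_append]
    simp only [PySem.List.enumerate, List.foldl]
    set d := (PySem.List.enumerate u 0).foldl
      (fun (d : PySem.Dict Char (Int × Int)) p =>
        if d.contains p.2 then d.modify p.2 (0, 0) (fun q => (q.1, p.1))
        else d.insert p.2 (p.1, p.1))
      PySem.Dict.empty with hd
    have hkeys : d.keys = PySem.List.dedup u := by
      rw [PySem.Dict.keys, ih, List.map_map]
      simp [Function.comp_def]
    have hnd : d.keys.Nodup := by rw [hkeys]; exact PySem.List.nodup_dedup u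
    have hcont : d.contains a = decide (a ∈ u) := by
      rw [PySem.Dict.contains_eq_decide_mem_keys, hkeys]
      simp
    by_cases hau : a ∈ u
    · rw [if_pos (by rw [hcont]; simpa using hau)]
      rw [PySem.Dict.modify]
      have hmem_items : (a, fstI u a, lstI u a) ∈ d.items := by
        rw [ih]
        exact List.mem_map_of_mem ((PySem.List.mem_dedup u a).mpr hau)
      have hgetD : d.getD a (0,0) = (fstI u a, lstI u a) :=
        PySem.Dict.getD_of_mem_items d hmem_items hnd (0,0)
      rw [hgetD, PySem.Dict.items_insert_of_contains _ _ (by rw [hcont]; simpa using hau),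
        ih, List.map_map, dedup_append, if_pos hau]
      apply List.map_congr_left
      intro c hc
      have hcu : c ∈ u := mem_of_mem_dedup hc
      by_cases hca : c = a
      · subst hca
        simp [fstI_append_mem c hcu, lstI_append_self]
      · simp [Function.comp, hca, fstI_append_mem a hcu, lstI_append_ne u a c hca]
    · rw [if_neg (by rw [hcont]; simpa using hau)]
      rw [PySem.Dict.items_insert_of_not_contains _ _ (by rw [hcont]; simpa using hau),
        ih, dedup_append, if_neg hau, List.map_append]
      congr 1
      · apply List.map_congr_left
        intro c hc
        have hcu : c ∈ u := mem_of_mem_dedup hc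
        have hca : c ≠ a := fun h => hau (h ▸ hcu)
        simp [fstI_append_mem a hcu, lstI_append_ne u a c hca]
      · simp [fstI_append_self hau, lstI_append_self]

lemma dedup_pairwise_fstI (l : List Char) :
    (PySem.List.dedup l).Pairwise (fun a b => fstI l a < fstI l b) := by
  induction l using List.reverseRecOn with
  | nil => simp [PySem.List.dedup, PySem.Set.ofList, PySem.Set.empty]
  | append_singleton u a ih =>
    rw [dedup_append]
    by_cases hau : a ∈ u
    · rw [if_pos hau]
      refine ih.imp_of_mem ?_
      intro x y hx hy hxy
      rw [fstI_append_mem a (mem_of_mem_dedup hx), fstI_append_mem a (mem_of_mem_dedup hy)]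
      exact hxy
    · rw [if_neg hau]
      rw [List.pairwise_append]
      refine ⟨ih.imp_of_mem ?_, by simp, ?_⟩
      · intro x y hx hy hxy
        rw [fstI_append_mem a (mem_of_mem_dedup hx), fstI_append_mem a (mem_of_mem_dedup hy)]
        exact hxy
      · intro x hx b hb
        simp at hb
        have hxu : x ∈ u := mem_of_mem_dedup hx
        rw [hb, fstI_append_mem a hxu, fstI_append_self hau]
        exact fstI_lt_len hxu

def ivOf (l : List Char) (c : Char) : Int × Int := (fstI l c, lstI l c)

def ivsFrom (l : List Char) (i : Nat) : List (Int × Int) :=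
  ((PySem.List.dedup l).filter (fun c => decide ((i : Int) ≤ fstI l c))).map (ivOf l)

lemma filter_threshold {α : Type} (f : α → Int) (i : Int) (c : α) :
    ∀ (ds : List α), ds.Pairwise (fun a b => f a < f b) → c ∈ ds → f c = i →
      ds.filter (fun x => decide (i ≤ f x)) = c :: ds.filter (fun x => decide (i + 1 ≤ f x)) := by
  intro ds
  induction ds with
  | nil => intro _ h; simp at h
  | cons x t ihx =>
    intro hp hc hfc
    rcases List.pairwise_cons.mp hp with ⟨hxall, hpt⟩
    rcases List.mem_cons.mp hc with heq | hc
    · subst heq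
      rw [List.filter_cons_of_pos (by simp [hfc]), List.filter_cons_of_neg (by simp [hfc])]
      congr 1
      apply List.filter_congr
      intro y hy
      have := hxall y hy
      simp only [decide_eq_decide]
      omega
    · have hfx : f x < f c := hxall c hc
      rw [List.filter_cons_of_neg (by simp; omega), List.filter_cons_of_neg (by simp; omega)]
      exact ihx hpt hc hfc

lemma ivsFrom_head_le {l : List Char} {i : Nat} {v : Int × Int} {t : List (Int × Int)}
    (h : ivsFrom l i = v :: t) : (i : Int) ≤ v.1 := by
  have : v ∈ ivsFrom l i := by rw [h]; exact List.mem_cons_self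
  rw [ivsFrom] at this
  obtain ⟨c, hc, rfl⟩ := List.mem_map.mp this
  have := List.mem_filter.mp hc
  simpa [ivOf] using this.2

lemma ivsFrom_new {l : List Char} {i : Nat} (hi : i < l.length)
    (hnew : fstI l (gD l i) = (i : Int)) :
    ivsFrom l i = ((i : Int), lstI l (gD l i)) :: ivsFrom l (i+1) := by
  have hmem : gD l i ∈ PySem.List.dedup l :=
    (PySem.List.mem_dedup l (gD l i)).mpr (gD_mem hi)
  rw [ivsFrom, filter_threshold (fstI l) (i : Int) (gD l i) _ (dedup_pairwise_fstI l) hmem hnew]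
  rw [List.map_cons, ivOf, hnew, ivsFrom]
  norm_num

lemma ivsFrom_seen {l : List Char} {i : Nat} (_hi : i < l.length)
    (hseen : fstI l (gD l i) ≠ (i : Int)) :
    ivsFrom l i = ivsFrom l (i+1) := by
  rw [ivsFrom, ivsFrom]
  congr 1
  apply List.filter_congr
  intro x hx
  have hxl : x ∈ l := mem_of_mem_dedup hx
  have hne : fstI l x ≠ (i : Int) := by
    intro he
    have h0 : 0 ≤ fstI l x := fstI_nonneg l x
    have htn : (fstI l x).toNat = i := by omega
    have := gD_fstI hxl
    rw [htn] at this
    exact hseen (this ▸ he)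
  have h1 : ((i : Int) ≤ fstI l x) ↔ ((i : Int) + 1 ≤ fstI l x) := by
    constructor <;> intro h <;> omega
  simp only [decide_eq_decide]
  push_cast
  exact h1

lemma ivsFrom_len (l : List Char) : ivsFrom l l.length = [] := by
  rw [ivsFrom]
  have : ∀ x ∈ PySem.List.dedup l, ¬ ((l.length : Int) ≤ fstI l x) := by
    intro x hx
    have := fstI_lt_len (mem_of_mem_dedup hx)
    omega
  rw [List.filter_eq_nil_iff.mpr (by intro x hx; simpa using this x hx)]
  rfl

def mergeGo : List (Int × Int) → (Int × Int) → List (Int × Int) → List (Int × Int)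
  | done, cur, [] => done ++ [cur]
  | done, cur, iv :: t =>
    if iv.1 < cur.2 then mergeGo done (cur.1, max cur.2 iv.2) t
    else mergeGo (done ++ [cur]) iv t

def mergeF : List (Int × Int) → List (Int × Int)
  | [] => []
  | v :: t => mergeGo [] v t

lemma mergeGo_cons_done (x : Int × Int) :
    ∀ (ivs : List (Int × Int)) (done : List (Int × Int)) (cur : Int × Int),
      mergeGo (x :: done) cur ivs = x :: mergeGo done cur ivs := by
  intro ivs
  induction ivs with
  | nil => intro done cur; simp [mergeGo]
  | cons iv t ih =>
    intro done cur
    rw [mergeGo, mergeGo]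
    split
    · exact ih done (cur.1, max cur.2 iv.2)
    · rw [show x :: done ++ [cur] = x :: (done ++ [cur]) from rfl]
      exact ih (done ++ [cur]) iv

lemma mergeGo_cut {cur : Int × Int} {ivs : List (Int × Int)}
    (h : ∀ v t, ivs = v :: t → cur.2 < v.1) :
    mergeGo [] cur ivs = cur :: mergeF ivs := by
  cases ivs with
  | nil => simp [mergeGo, mergeF]
  | cons v t =>
    rw [mergeGo, mergeF]
    rw [if_neg (by have := h v t rfl; omega)]
    exact mergeGo_cons_done cur t [] v

lemma pySetD_append_neg_one (xs : List (Int × Int)) (x v : Int × Int) :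
    PySem.List.pySetD (xs ++ [x]) (-1) v = xs ++ [v] := by
  rw [PySem.List.pySetD, PySem.List.pySet?]
  have h1 : PySem.List.pyIdx? (xs ++ [x]).length (-1) = some xs.length := by
    simp [PySem.List.pyIdx?]
  rw [h1]
  simp [List.set_append]

lemma merge_fold :
    ∀ (ivs done : List (Int × Int)) (cur : Int × Int),
      ivs.foldl
        (fun (res : List (Int × Int)) iv =>
          if iv.1 < (PySem.List.pyGetD res (-1) (0, 0)).2 then
            PySem.List.pySetD res (-1)
              ((PySem.List.pyGetD res (-1) (0, 0)).1,
                max (PySem.List.pyGetD res (-1) (0, 0)).2 iv.2)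
          else res ++ [iv])
        (done ++ [cur]) = mergeGo done cur ivs := by
  intro ivs
  induction ivs with
  | nil => intro done cur; simp [mergeGo]
  | cons iv t ih =>
    intro done cur
    rw [List.foldl_cons, mergeGo]
    rw [PySem.List.pyGetD_neg_one_append_singleton]
    split
    · rw [pySetD_append_neg_one]
      exact ih done (cur.1, max cur.2 iv.2)
    · rw [show done ++ [cur] ++ [iv] = (done ++ [cur]) ++ [iv] from rfl]
      exact ih (done ++ [cur]) iv

lemma pvAMerge_eq_mergeGo (v : Int × Int) (t : List (Int × Int)) :
    pvAMerge (v :: t) = mergeGo [] v t := by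
  rw [pvAMerge]
  have h := PySem.List.foldl_pyRange_pyGetD (v :: t) ((0,0) : Int × Int)
    (fun (res : List (Int × Int)) iv =>
      if iv.1 < (PySem.List.pyGetD res (-1) (0, 0)).2 then
        PySem.List.pySetD res (-1)
          ((PySem.List.pyGetD res (-1) (0, 0)).1,
            max (PySem.List.pyGetD res (-1) (0, 0)).2 iv.2)
      else res ++ [iv])
    [PySem.List.pyGetD (v :: t) 0 (0, 0)] (a := 1) (by norm_num)
  rw [h]
  rw [PySem.List.pyGetD_zero_cons]
  simpa using merge_fold t [] v

def scanB (l : List Char) : List Char → Nat → Int → Int → List Int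
  | [], _, _, _ => []
  | c :: t, i, a, e =>
    let e' := max e (lstI l c)
    if e' = (i : Int) then ((i : Int) - a + 1) :: scanB l t (i+1) ((i : Int)+1) e'
    else scanB l t (i+1) a e'

lemma pvB_fold_eq_scanB (l : List Char) :
    ∀ (t : List Char) (i : Nat) (res : List Int) (a e : Int),
      (∀ c ∈ t, c ∈ l) →
      ((PySem.List.enumerate t (i : Int)).foldl
        (fun (st : List Int × Int × Int) p =>
          if p.1 = max st.2.2 ((pvBLast l).getD p.2 0) then
            (st.1 ++ [p.1 - st.2.1 + 1], p.1 + 1, max st.2.2 ((pvBLast l).getD p.2 0))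
          else (st.1, st.2.1, max st.2.2 ((pvBLast l).getD p.2 0)))
        (res, a, e)).1 = res ++ scanB l t i a e := by
  intro t
  induction t with
  | nil => intro i res a e _; simp [PySem.List.enumerate, scanB]
  | cons c t ih =>
    intro i res a e hmem
    have hcl : c ∈ l := hmem c List.mem_cons_self
    have hmem' : ∀ x ∈ t, x ∈ l := fun x hx => hmem x (List.mem_cons_of_mem c hx)
    have hcast : ((i + 1 : Nat) : Int) = (i : Int) + 1 := by push_cast; ring
    rw [show PySem.List.enumerate (c :: t) (i : Int) = ((i : Int), c) :: PySem.List.enumerate t ((i : Int) + 1) from rfl]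
    rw [List.foldl_cons]
    simp only [pvBLast_getD l c 0, if_pos hcl, scanB]
    by_cases hc : (i : Int) = max e (lstI l c)
    · rw [if_pos hc, if_pos hc.symm]
      have ih1 := ih (i+1) (res ++ [(i:Int) - a + 1]) ((i:Int)+1) (max e (lstI l c)) hmem'
      rw [hcast] at ih1
      rw [ih1]
      simp
    · rw [if_neg hc, if_neg (fun h => hc h.symm)]
      have ih1 := ih (i+1) res a (max e (lstI l c)) hmem'
      rw [hcast] at ih1
      rw [ih1]

lemma core (l : List Char) :
    ∀ (k i : Nat) (a m : Int), k = l.length - i → 1 ≤ i → i ≤ l.length →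
      m = Mx l i → (i : Int) - 1 ≤ m → (m = (i : Int) - 1 → a = (i : Int)) →
      scanB l (l.drop i) i a m =
        (if m = (i : Int) - 1 then mergeF (ivsFrom l i)
         else mergeGo [] (a, m) (ivsFrom l i)).map (fun e => e.2 - e.1 + 1) := by
  intro k
  induction k with
  | zero =>
    intro i a m hk h1 hi hm _ _
    have hieq : i = l.length := by omega
    subst hieq
    rw [List.drop_length, ivsFrom_len]
    have hle := Mx_lt_len h1 hi
    have hge := Mx_ge h1 hi
    rw [if_pos (by omega)]
    rfl
  | succ k ihk =>
    intro i a m hk h1 hi hm hge hanch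
    have hilt : i < l.length := by omega
    have hdrop : l.drop i = gD l i :: l.drop (i+1) := by
      rw [List.drop_eq_getElem_cons hilt]
      congr 1
      rw [gD, List.getD_eq_getElem _ _ hilt]
    rw [hdrop, scanB]
    have hcl : gD l i ∈ l := gD_mem hilt
    have hfle : fstI l (gD l i) ≤ (i : Int) := fstI_gD_le hilt
    have hlge : (i : Int) ≤ lstI l (gD l i) := le_lstI_gD hilt
    have hMx1 : Mx l (i+1) = max (Mx l i) (lstI l (gD l i)) := rfl
    have hMx : max m (lstI l (gD l i)) = Mx l (i+1) := by rw [hMx1, ← hm]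
    have hcast : ((i + 1 : Nat) : Int) = (i : Int) + 1 := by push_cast; ring
    by_cases hfresh : m = (i : Int) - 1
    · -- previous position was a cut; gD l i must be a new character
      have hnew : fstI l (gD l i) = (i : Int) := by
        rcases lt_or_eq_of_le hfle with h | h
        · exfalso
          have := Mx_seen hilt hi h
          rw [← hm, hfresh] at this
          omega
        · exact h
      have ha : a = (i : Int) := hanch hfresh
      have hmax : max m (lstI l (gD l i)) = lstI l (gD l i) := by omega
      rw [ivsFrom_new hilt hnew, if_pos hfresh, mergeF]
      by_cases hcut : lstI l (gD l i) = (i : Int)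
      · rw [if_pos (by omega)]
        have ih1 := ihk (i+1) ((i:Int)+1) (max m (lstI l (gD l i))) (by omega) (by omega)
          (by omega) hMx (by rw [hcast]; omega) (by intro _; rw [hcast])
        rw [ih1, hmax, hcut]
        rw [if_pos (by rw [hcast]; ring)]
        have hhead : ∀ v t, ivsFrom l (i+1) = v :: t → (((i:Int)), (i:Int)).2 < v.1 := by
          intro v t hvt
          have := ivsFrom_head_le hvt
          rw [hcast] at this
          show ((i:Int)) < v.1
          omega
        rw [mergeGo_cut hhead, List.map_cons, ha]
      · rw [if_neg (by omega)]
        have ih1 := ihk (i+1) a (max m (lstI l (gD l i))) (by omega) (by omega) (by omega)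
          hMx (by rw [hcast]; omega) (by rw [hcast]; intro hcon; omega)
        rw [ih1, hmax]
        rw [if_neg (by rw [hcast]; omega)]
        rw [ha]
    · -- mid-segment: m ≥ i
      have hmi : (i : Int) ≤ m := by omega
      by_cases hnew : fstI l (gD l i) = (i : Int)
      · -- new character: A merges, scan keeps going
        have hmne : m ≠ (i : Int) := by
          intro hmeq
          obtain ⟨j, hj, hjeq⟩ := Mx_attained h1 hi
          have hjlen : j < l.length := by omega
          have htn : (lstI l (gD l j)).toNat = i := by omega
          have hg := gD_lstI (l := l) (c := gD l j) (gD_mem hjlen)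
          rw [htn] at hg
          have h2 : fstI l (gD l j) ≤ (j : Int) := fstI_gD_le hjlen
          rw [← hg] at h2
          rw [hnew] at h2
          omega
        have himlt : (i : Int) < m := by omega
        rw [ivsFrom_new hilt hnew, if_neg hfresh, mergeGo]
        have himlt2 : (((i:Int)), lstI l (gD l i)).1 < (a, m).2 := himlt
        rw [if_pos himlt2]
        have hnocut : max m (lstI l (gD l i)) ≠ (i : Int) := by omega
        rw [if_neg hnocut]
        have ih1 := ihk (i+1) a (max m (lstI l (gD l i))) (by omega) (by omega) (by omega)
          hMx (by rw [hcast]; omega) (by rw [hcast]; intro hcon; omega)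
        rw [ih1]
        rw [if_neg (by rw [hcast]; omega)]
      · -- seen character
        have hfl : fstI l (gD l i) < (i : Int) := by
          rcases lt_or_eq_of_le hfle with h | h
          · exact h
          · exact absurd h hnew
        have hlm : lstI l (gD l i) ≤ m := by rw [hm]; exact Mx_seen hilt hi hfl
        have hmax : max m (lstI l (gD l i)) = m := by omega
        have hMx' : m = Mx l (i+1) := by rw [← hMx, hmax]
        rw [ivsFrom_seen hilt hnew, if_neg hfresh, hmax]
        by_cases hcut : m = (i : Int)
        · rw [if_pos hcut]
          have ih1 := ihk (i+1) ((i:Int)+1) m (by omega) (by omega) (by omega)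
            hMx' (by rw [hcast]; omega) (by intro _; rw [hcast])
          rw [ih1]
          rw [if_pos (by rw [hcast]; omega)]
          have hhead : ∀ v t, ivsFrom l (i+1) = v :: t → (a, m).2 < v.1 := by
            intro v t hvt
            have := ivsFrom_head_le hvt
            rw [hcast] at this
            show m < v.1
            omega
          rw [mergeGo_cut hhead, List.map_cons]
          have : ((a, m).2 - (a, m).1 + 1) = (i : Int) - a + 1 := by
            show m - a + 1 = (i : Int) - a + 1
            omega
          rw [this]
        · rw [if_neg hcut]
          have ih1 := ihk (i+1) a m (by omega) (by omega) (by omega)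
            hMx' (by rw [hcast]; omega) (by rw [hcast]; intro hcon; omega)
          rw [ih1]
          rw [if_neg (by rw [hcast]; omega)]

lemma fstI_gD_zero {l : List Char} (hne : l ≠ []) : fstI l (gD l 0) = 0 := by
  have hpos : 0 < l.length := List.length_pos_iff.mpr hne
  have h1 := fstI_gD_le (l := l) (j := 0) hpos
  have h2 := fstI_nonneg l (gD l 0)
  omega

lemma dedup_split (l : List Char) (hne : l ≠ []) :
    PySem.List.dedup l =
      gD l 0 :: ((PySem.List.dedup l).filter (fun c => decide ((1:Int) ≤ fstI l c))) := by
  have hpos : 0 < l.length := List.length_pos_iff.mpr hne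
  have hmem : gD l 0 ∈ PySem.List.dedup l := (PySem.List.mem_dedup l _).mpr (gD_mem hpos)
  have h := filter_threshold (fstI l) 0 (gD l 0) (PySem.List.dedup l)
    (dedup_pairwise_fstI l) hmem (fstI_gD_zero hne)
  have hall : (PySem.List.dedup l).filter (fun c => decide ((0:Int) ≤ fstI l c)) =
      PySem.List.dedup l := by
    apply List.filter_eq_self.mpr
    intro x _
    simpa using fstI_nonneg l x
  rw [hall] at h
  conv_lhs => rw [h]
  norm_num

lemma vals_eq (l : List Char) :
    (pvAHash l).values = (PySem.List.dedup l).map (ivOf l) := by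
  rw [PySem.Dict.values, pvAHash_items, List.map_map]
  rfl

lemma sorted_vals (l : List Char) :
    PySem.List.sorted (pvAHash l).values (fun x => x.1) = (PySem.List.dedup l).map (ivOf l) := by
  rw [vals_eq]
  apply PySem.List.sorted_eq_of_perm_of_pairwise_lt _ _ _ (List.Perm.refl _)
  rw [List.pairwise_map]
  exact (dedup_pairwise_fstI l).imp (fun h => h)

lemma portA_eq (l : List Char) (hne : l ≠ []) :
    (pvAMerge (PySem.List.sorted (pvAHash l).values (fun x => x.1))).map
      (fun e => e.2 - e.1 + 1)
    = (mergeGo [] (0, lstI l (gD l 0)) (ivsFrom l 1)).map (fun e => e.2 - e.1 + 1) := by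
  rw [sorted_vals, dedup_split l hne, List.map_cons, pvAMerge_eq_mergeGo]
  have h1 : ivOf l (gD l 0) = (0, lstI l (gD l 0)) := by
    rw [ivOf, fstI_gD_zero hne]
  rw [h1]
  rfl

lemma portB_eq (s : String) :
    partitionLabels_alt_alt s = scanB s.toList s.toList 0 0 0 := by
  have h := pvB_fold_eq_scanB s.toList s.toList 0 [] 0 0 (fun c hc => hc)
  simp only [Nat.cast_zero] at h
  exact h

lemma main_eq (s : String) (hne : s.toList ≠ []) :
    partitionLabels_alt s = partitionLabels_alt_alt s := by
  rw [portB_eq, partitionLabels_alt, portA_eq s.toList hne]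
  set l := s.toList with hl
  have hpos : 0 < l.length := List.length_pos_iff.mpr hne
  have hdrop : l.drop 0 = gD l 0 :: l.drop 1 := by
    rw [List.drop_eq_getElem_cons hpos]
    congr 1
    rw [gD, List.getD_eq_getElem _ _ hpos]
  have hscan : scanB l l 0 0 0 = scanB l (l.drop 0) 0 0 0 := by rw [List.drop_zero]
  rw [hscan, hdrop, scanB]
  have hl0 : 0 ≤ lstI l (gD l 0) := le_lstI_gD hpos
  have hmax : max (0:Int) (lstI l (gD l 0)) = lstI l (gD l 0) := by omega
  rw [hmax]
  simp only [Nat.cast_zero, zero_add]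
  have hMx1 : Mx l 1 = lstI l (gD l 0) := by
    rw [show Mx l 1 = max (Mx l 0) (lstI l (gD l 0)) from rfl]
    rw [show Mx l 0 = 0 from rfl]
    omega
  by_cases hcut : lstI l (gD l 0) = (0 : Int)
  · rw [if_pos hcut]
    have hc := core l (l.length - 1) 1 1 (lstI l (gD l 0)) rfl (by omega) (by omega)
      (by rw [hMx1]) (by omega) (by intro _; norm_num)
    rw [show ((1:Nat):Int) = 1 from rfl] at hc
    rw [hc, if_pos (by omega)]
    have hhead : ∀ v t, ivsFrom l 1 = v :: t → ((0:Int), lstI l (gD l 0)).2 < v.1 := by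
      intro v t hvt
      have := ivsFrom_head_le hvt
      show lstI l (gD l 0) < v.1
      push_cast at this
      omega
    rw [mergeGo_cut hhead, List.map_cons]
    rw [hcut]
  · rw [if_neg hcut]
    have hlpos : 0 < lstI l (gD l 0) := by omega
    have hc := core l (l.length - 1) 1 0 (lstI l (gD l 0)) rfl (by omega) (by omega)
      (by rw [hMx1]) (by omega) (by intro hcon; omega)
    rw [show ((1:Nat):Int) = 1 from rfl] at hc
    rw [hc, if_neg (by omega)]

-- ===== VERDICT (by name: the statement is the Claim_ definition above) =====
theorem partitionLabels_alt_spec : Claim_equal_partitionLabels_alt := by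
  intro s _ hpre
  exact main_eq s hpre
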